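-- pv_equiv track=rewrite | github.com/dineshpotla/evidence-grounded-drug-safety-decision-support-assistant | evaluation/scripts/run_eval.py | required_prefix_hits
-- ===== SOURCE A (Python) =====
-- def required_prefix_hits(required: list[str], evidence_ids: list[str]) -> tuple[int, int]:
--     if not required:
--         return (0, 0)
--
--     hits = 0
--     for prefix in required:
--         if any(eid.startswith(prefix) for eid in evidence_ids):
--             hits += 1
--
--     return hits, len(required)
-- ===== SOURCE B (Python) =====
-- def required_prefix_hits(required: list[str], evidence_ids: list[str]) -> tuple[int, int]:
--     prefixes = set()
--     for eid in evidence_ids: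
--         for i in range(len(eid) + 1):
--             prefixes.add(eid[:i])
--     hits = sum(1 for p in required if p in prefixes)
--     return hits, len(required)
-- ===== Notes on version B (the rewrite author's own statement) =====
-- stated objective: faster
-- what changed: B precomputes the set of all prefixes of the evidence ids once, turning the per-required-prefix scan over all evidence ids into a single hash-set membership test.
import Mathlib
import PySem

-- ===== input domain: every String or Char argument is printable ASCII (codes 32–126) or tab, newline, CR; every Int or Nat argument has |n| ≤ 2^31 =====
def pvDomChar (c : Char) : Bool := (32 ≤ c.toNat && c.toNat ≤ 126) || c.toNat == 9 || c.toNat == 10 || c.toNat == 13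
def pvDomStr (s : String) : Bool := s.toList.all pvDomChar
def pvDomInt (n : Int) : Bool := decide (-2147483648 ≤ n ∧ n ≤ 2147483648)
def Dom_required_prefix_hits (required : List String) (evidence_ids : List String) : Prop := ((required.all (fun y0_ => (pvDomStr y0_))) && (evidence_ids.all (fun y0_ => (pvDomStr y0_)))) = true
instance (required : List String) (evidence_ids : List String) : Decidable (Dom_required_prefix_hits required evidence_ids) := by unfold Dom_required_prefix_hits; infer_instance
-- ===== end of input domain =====

-- B builds the set of all prefixes of the evidence ids once; each required prefix is then a single set-membership test (alternative data structure, no per-prefix scan of the evidence).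

-- ===== PORT A =====
def required_prefix_hits (required : List String) (evidence_ids : List String) : List Int :=
  if required.isEmpty then [0, 0]
  else
    let hits := required.foldl (fun h prefix_ =>
      if evidence_ids.any (fun eid => PySem.Str.startswith eid prefix_) then h + 1 else h) (0 : Int)
    [hits, (required.length : Int)]

-- ===== PORT B =====
def pvPrefixSet (evidence_ids : List String) : PySem.Set String :=
  evidence_ids.foldl (fun s eid =>
    (PySem.List.pyRange 0 ((PySem.Str.len eid : Int) + 1) 1).foldl
      (fun s i => PySem.Set.add s (PySem.Str.slice eid none (some i))) s) PySem.Set.empty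

def required_prefix_hits_alt (required : List String) (evidence_ids : List String) : List Int :=
  let prefixes := pvPrefixSet evidence_ids
  let hits := required.foldl (fun h p =>
    h + (if PySem.Set.contains prefixes p then 1 else 0)) (0 : Int)
  [hits, (required.length : Int)]

-- ===== PRECONDITION & SPEC =====
def Spec_required_prefix_hits (required : List String) (evidence_ids : List String) (out : List Int) : Prop := out = required_prefix_hits_alt required evidence_ids
instance (required : List String) (evidence_ids : List String) (out : List Int) : Decidable (Spec_required_prefix_hits required evidence_ids out) := by unfold Spec_required_prefix_hits; infer_instance

-- ===== CLAIM (what is proved, stated in full; the proofs are below) =====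
def Claim_equal_required_prefix_hits : Prop := ∀ (required : List String) (evidence_ids : List String), Dom_required_prefix_hits required evidence_ids → Spec_required_prefix_hits required evidence_ids (required_prefix_hits required evidence_ids)

-- ===== LEMMAS AND PROOFS =====

-- the strings produced for one evidence id are exactly its prefixes
theorem pvMemMapSlices (e x : String) :
    x ∈ (PySem.List.pyRange 0 ((PySem.Str.len e : Int) + 1) 1).map
        (fun i => PySem.Str.slice e none (some i)) ↔ x.toList <+: e.toList := by
  simp only [List.mem_map, PySem.List.mem_pyRange_one, PySem.Str.len_eq]
  constructor
  · rintro ⟨i, ⟨h0, _⟩, rfl⟩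
    have : (PySem.Str.slice e none (some i)).toList = e.toList.take i.toNat := by
      rw [PySem.Str.toList_slice, PySem.Chars.slice_eq_listSlice, PySem.List.slice_to _ h0]
    rw [this]
    exact List.take_prefix _ _
  · intro h
    refine ⟨(x.toList.length : Int), ⟨by positivity, ?_⟩, ?_⟩
    · have := h.length_le
      omega
    · apply String.toList_inj.mp
      rw [PySem.Str.toList_slice, PySem.Chars.slice_eq_listSlice,
        PySem.List.slice_to _ (by positivity)]
      simp only [Int.toNat_natCast]
      exact (List.prefix_iff_eq_take.mp h).symm

theorem pvMemFoldl (l : List String) (s : PySem.Set String) (x : String) :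
    x ∈ l.foldl (fun s eid =>
        (PySem.List.pyRange 0 ((PySem.Str.len eid : Int) + 1) 1).foldl
          (fun s i => PySem.Set.add s (PySem.Str.slice eid none (some i))) s) s
    ↔ x ∈ s ∨ ∃ eid ∈ l, x.toList <+: eid.toList := by
  induction l generalizing s with
  | nil => simp
  | cons e t ih =>
    rw [List.foldl_cons, ih, ← PySem.Set.update_map_eq_foldl_add, PySem.Set.mem_update,
      pvMemMapSlices]
    simp only [List.mem_cons]
    constructor
    · rintro (⟨hs | he⟩ | ⟨eid, hm, hp⟩)
      · exact Or.inl hs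
      · exact Or.inr ⟨e, Or.inl rfl, he⟩
      · exact Or.inr ⟨eid, Or.inr hm, hp⟩
    · rintro (hs | ⟨eid, rfl | hm, hp⟩)
      · exact Or.inl (Or.inl hs)
      · exact Or.inl (Or.inr hp)
      · exact Or.inr ⟨eid, hm, hp⟩

theorem pvMemPrefixSet (evidence_ids : List String) (p : String) :
    p ∈ pvPrefixSet evidence_ids ↔ ∃ eid ∈ evidence_ids, p.toList <+: eid.toList := by
  unfold pvPrefixSet
  rw [pvMemFoldl]
  simp [PySem.Set.empty]

-- A's per-prefix test equals B's set-membership test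
theorem pvCondEq (evidence_ids : List String) (p : String) :
    (evidence_ids.any fun eid => PySem.Str.startswith eid p)
      = PySem.Set.contains (pvPrefixSet evidence_ids) p := by
  rw [Bool.eq_iff_iff]
  simp only [List.any_eq_true, PySem.Str.startswith_eq, PySem.Chars.startswith_iff,
    PySem.Set.contains_iff, pvMemPrefixSet]

theorem pvFoldHits (req : List String) (c1 c2 : String → Bool) (hc : ∀ p, c1 p = c2 p)
    (h : Int) :
    req.foldl (fun h p => if c1 p then h + 1 else h) h
      = req.foldl (fun h p => h + if c2 p then 1 else 0) h := by
  induction req generalizing h with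
  | nil => rfl
  | cons a t ih =>
    have h1 := hc a
    cases h2 : c2 a <;> simp [List.foldl_cons, h1, h2, ih]

-- ===== VERDICT (by name: the statement is the Claim_ definition above) =====
theorem required_prefix_hits_spec : Claim_equal_required_prefix_hits := by
  intro required evidence_ids _
  unfold Spec_required_prefix_hits required_prefix_hits required_prefix_hits_alt
  by_cases hr : required.isEmpty
  · rw [List.isEmpty_iff.mp hr]
    simp
  · simp only [hr, Bool.false_eq_true, if_false]
    rw [pvFoldHits required _ _ (fun p => pvCondEq evidence_ids p) 0]
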